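-- pv_equiv track=rewrite | github.com/ptarau/PrologTutorial | code/minlog/nparser.py | to_clause
-- ===== SOURCE A (Python) =====
-- def to_clause(xs):
--     if ':' not in xs: return (xs, ())
--     neck = xs.index(':')
--     head = xs[:neck]
--     body = xs[neck + 1:]
--     if ',' not in xs: return (head, (body,))
--     bss = []
--     bs = []
--     for b in body:
--         if b == ',':
--             bss.append(tuple(bs))
--             bs = []
--         else:
--             bs.append(b)
--     bss.append(tuple(bs))
--     return (head, tuple(bss))
-- ===== SOURCE B (Python) =====
-- def split_commas(body):
--     if ',' in body:
--         i = body.index(',')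
--         return (tuple(body[:i]),) + split_commas(body[i + 1:])
--     return (tuple(body),)
--
-- def to_clause(xs):
--     if ':' not in xs: return (xs, ())
--     neck = xs.index(':')
--     head = xs[:neck]
--     body = xs[neck + 1:]
--     if ',' not in xs: return (head, (body,))
--     return (head, split_commas(body))
-- ===== Notes on version B (the rewrite author's own statement) =====
-- stated objective: alternative
-- what changed: The flush-on-comma accumulator loop is replaced by a recursive decomposition that repeatedly splits the body at the first comma (index + slice), keeping the head/body split and both guard clauses.
import Mathlib
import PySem

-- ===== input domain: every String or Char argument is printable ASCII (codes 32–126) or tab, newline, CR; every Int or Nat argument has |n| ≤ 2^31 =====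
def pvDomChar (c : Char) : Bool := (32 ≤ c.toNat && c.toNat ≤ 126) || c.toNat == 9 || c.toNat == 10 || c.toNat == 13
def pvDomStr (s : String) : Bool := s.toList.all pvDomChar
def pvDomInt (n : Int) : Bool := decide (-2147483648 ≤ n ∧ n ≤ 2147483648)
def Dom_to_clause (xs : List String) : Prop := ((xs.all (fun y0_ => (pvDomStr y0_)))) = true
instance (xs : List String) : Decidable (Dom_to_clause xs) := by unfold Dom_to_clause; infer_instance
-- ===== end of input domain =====

-- B replaces A's flush-on-comma accumulator loop with recursion that splits the body at its
-- first comma; same values everywhere (alternative decomposition, no speed claim).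

-- ===== PORT A =====
def to_clause (xs : List String) : List String × List (List String) :=
  if ":" ∉ xs then (xs, [])
  else
    let neck : Nat := (PySem.List.index? xs ":").getD 0
    let head := PySem.List.slice xs none (some (neck : Int))
    let body := PySem.List.slice xs (some ((neck : Int) + 1)) none
    if "," ∉ xs then (head, [body])
    else
      let r := body.foldl
        (fun (acc : List (List String) × List String) b =>
          if b == "," then (acc.1 ++ [acc.2], []) else (acc.1, acc.2 ++ [b]))
        ([], [])
      (head, r.1 ++ [r.2])

-- ===== PORT B =====
-- helper for termination of splitCommas (cited in decreasing_by)
theorem splitCommas_dec (body : List String) (i : Nat)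
    (h : PySem.List.index? body "," = some i) :
    (PySem.List.slice body (some ((i : Int) + 1)) none).length < body.length := by
  have hsome : (PySem.List.index? body ",").isSome = true := by rw [h]; rfl
  have hmem : "," ∈ body := (PySem.List.index?_isSome_iff body ",").mp hsome
  have hpos : 0 < body.length := List.length_pos_of_mem hmem
  have hc : ((i : Int) + 1) = (((i + 1 : Nat)) : Int) := by push_cast; ring
  rw [hc, PySem.List.slice_from_natCast, List.length_drop]
  omega

def splitCommas (body : List String) : List (List String) :=
  match h : PySem.List.index? body "," with
  | some i =>
      PySem.List.slice body none (some (i : Int)) ::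
        splitCommas (PySem.List.slice body (some ((i : Int) + 1)) none)
  | none => [body]
termination_by body.length
decreasing_by exact splitCommas_dec body i h

def to_clause_alt (xs : List String) : List String × List (List String) :=
  if ":" ∉ xs then (xs, [])
  else
    let neck : Nat := (PySem.List.index? xs ":").getD 0
    let head := PySem.List.slice xs none (some (neck : Int))
    let body := PySem.List.slice xs (some ((neck : Int) + 1)) none
    if "," ∉ xs then (head, [body])
    else (head, splitCommas body)

-- ===== PRECONDITION & SPEC =====
def Spec_to_clause (xs : List String) (out : List String × List (List String)) : Prop := out = to_clause_alt xs
instance (xs : List String) (out : List String × List (List String)) : Decidable (Spec_to_clause xs out) := by unfold Spec_to_clause; infer_instance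

-- ===== CLAIM (what is proved, stated in full; the proofs are below) =====
def Claim_equal_to_clause : Prop := ∀ (xs : List String), Dom_to_clause xs → Spec_to_clause xs (to_clause xs)

-- ===== LEMMAS AND PROOFS =====

theorem splitCommas_eq_some (body : List String) (i : Nat)
    (h : PySem.List.index? body "," = some i) :
    splitCommas body =
      PySem.List.slice body none (some (i : Int)) ::
        splitCommas (PySem.List.slice body (some ((i : Int) + 1)) none) := by
  conv_lhs => rw [splitCommas.eq_def]
  split
  · next j hj => rw [h] at hj; cases hj; rfl
  · next hj => rw [h] at hj; cases hj

theorem splitCommas_eq_none (body : List String)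
    (h : PySem.List.index? body "," = none) : splitCommas body = [body] := by
  conv_lhs => rw [splitCommas.eq_def]
  split
  · next j hj => rw [h] at hj; cases hj
  · rfl

theorem splitCommas_ne_nil (body : List String) : splitCommas body ≠ [] := by
  unfold splitCommas
  split <;> simp

theorem splitCommas_cons (a : String) (l : List String) :
    splitCommas (a :: l) =
      if a = "," then [] :: splitCommas l
      else (splitCommas l).modifyHead (a :: ·) := by
  by_cases ha : a = ","
  · subst ha
    rw [if_pos rfl, splitCommas_eq_some ("," :: l) 0 (PySem.List.index?_cons_self "," l)]
    norm_num [PySem.List.slice_from_one, PySem.List.slice_to ("," :: l) le_rfl]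
  · rw [if_neg ha]
    cases hi : PySem.List.index? l "," with
    | none =>
        have h' : PySem.List.index? (a :: l) "," = none := by
          rw [PySem.List.index?_cons_of_ne l ha, hi]; rfl
        rw [splitCommas_eq_none _ h', splitCommas_eq_none _ hi]
        rfl
    | some i =>
        have h' : PySem.List.index? (a :: l) "," = some (i + 1) := by
          rw [PySem.List.index?_cons_of_ne l ha, hi]; rfl
        rw [splitCommas_eq_some _ _ h', splitCommas_eq_some _ _ hi]
        have h2 : (((i + 1 : Nat)) : Int) + 1 = (((i + 2 : Nat)) : Int) := by push_cast; ring
        have h3 : ((i : Int) + 1) = (((i + 1 : Nat)) : Int) := by push_cast; ring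
        rw [h2, h3, PySem.List.slice_from_natCast, PySem.List.slice_from_natCast,
          PySem.List.slice_to_natCast, PySem.List.slice_to_natCast]
        simp [List.take_succ_cons, List.drop_succ_cons]

theorem foldl_eq_splitCommas (l : List String) (bss : List (List String)) (bs : List String) :
    (l.foldl
        (fun (acc : List (List String) × List String) b =>
          if b == "," then (acc.1 ++ [acc.2], []) else (acc.1, acc.2 ++ [b]))
        (bss, bs)).1 ++
      [(l.foldl
        (fun (acc : List (List String) × List String) b =>
          if b == "," then (acc.1 ++ [acc.2], []) else (acc.1, acc.2 ++ [b]))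
        (bss, bs)).2] =
    bss ++ (splitCommas l).modifyHead (bs ++ ·) := by
  induction l generalizing bss bs with
  | nil =>
      rw [splitCommas_eq_none [] rfl]
      simp
  | cons a l ih =>
      rw [splitCommas_cons]
      by_cases ha : a = ","
      · subst ha
        simp only [List.foldl_cons, beq_self_eq_true, if_pos, ih]
        obtain ⟨h, t, hht⟩ := List.exists_cons_of_ne_nil (splitCommas_ne_nil l)
        simp [hht]
      · have hb : (a == ",") = false := by simp [ha]
        simp only [List.foldl_cons, hb, if_neg ha, Bool.false_eq_true, if_false, ih]
        obtain ⟨h, t, hht⟩ := List.exists_cons_of_ne_nil (splitCommas_ne_nil l)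
        simp [hht]

-- ===== VERDICT (by name: the statement is the Claim_ definition above) =====
theorem to_clause_spec : Claim_equal_to_clause := by
  intro xs _
  unfold Spec_to_clause to_clause to_clause_alt
  by_cases h1 : ":" ∉ xs
  · simp only [if_pos h1]
  · simp only [if_neg h1]
    by_cases h2 : "," ∉ xs
    · simp only [if_pos h2]
    · simp only [if_neg h2]
      refine Prod.ext rfl ?_
      rw [foldl_eq_splitCommas]
      obtain ⟨h, t, hht⟩ := List.exists_cons_of_ne_nil
        (splitCommas_ne_nil (PySem.List.slice xs (some ((((PySem.List.index? xs ":").getD 0 : Nat) : Int) + 1)) none))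
      rw [hht]
      simp
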